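-- pv_equiv track=rewrite | github.com/swingerman/skills | plugins/crap-analyzer/skills/crap-analyzer/scripts/compute_crap.py | strip_ruby
-- ===== SOURCE A (Python) =====
-- def _blank_preserving_newlines(s: str) -> str:
--     return "".join(" " if ch != "\n" else "\n" for ch in s)
--
-- def strip_ruby(src: str) -> str:
--     """Ruby strings and # comments. Good-enough heuristic; ignores heredocs
--     (they'll just leak into the source but rarely confuse decision counting)."""
--     out: list[str] = []
--     i = 0
--     n = len(src)
--     while i < n:
--         c = src[i]
--         if c == "#":
--             j = src.find("\n", i)
--             j = n if j == -1 else j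
--             out.append(" " * (j - i))
--             i = j
--             continue
--         if c in ("'", '"'):
--             quote = c
--             j = i + 1
--             while j < n:
--                 if src[j] == "\\" and j + 1 < n:
--                     j += 2
--                     continue
--                 if src[j] == quote:
--                     j += 1
--                     break
--                 j += 1
--             out.append(_blank_preserving_newlines(src[i:j]))
--             i = j
--             continue
--         out.append(c)
--         i += 1
--     return "".join(out)
-- ===== SOURCE B (Python) =====
-- def strip_ruby(src: str) -> str:
--     """Single left-to-right DFA pass: states code/comment/string/escape,
--     emitting one output char per input char."""
--     out: list[str] = []
--     state = 0          # 0 = code, 1 = comment, 2 = in string, 3 = escape in string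
--     quote = ""
--     for ch in src:
--         if state == 0:
--             if ch == "#":
--                 state = 1
--                 out.append(" ")
--             elif ch in ("'", '"'):
--                 state = 2
--                 quote = ch
--                 out.append(" ")
--             else:
--                 out.append(ch)
--         elif state == 1:
--             if ch == "\n":
--                 state = 0
--                 out.append("\n")
--             else:
--                 out.append(" ")
--         elif state == 2:
--             if ch == "\\":
--                 state = 3
--             elif ch == quote:
--                 state = 0
--             out.append("\n" if ch == "\n" else " ")
--         else:
--             state = 2
--             out.append("\n" if ch == "\n" else " ")
--     return "".join(out)
-- ===== Notes on version B (the rewrite author's own statement) =====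
-- stated objective: alternative
-- what changed: Replaced the index-based loop with inner scans (str.find for comments, a nested while with manual escape stepping for strings, slicing, and a per-chunk blanking helper) by a single left-to-right four-state DFA pass (code/comment/string/escape) that emits exactly one output character per input character.
import Mathlib
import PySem

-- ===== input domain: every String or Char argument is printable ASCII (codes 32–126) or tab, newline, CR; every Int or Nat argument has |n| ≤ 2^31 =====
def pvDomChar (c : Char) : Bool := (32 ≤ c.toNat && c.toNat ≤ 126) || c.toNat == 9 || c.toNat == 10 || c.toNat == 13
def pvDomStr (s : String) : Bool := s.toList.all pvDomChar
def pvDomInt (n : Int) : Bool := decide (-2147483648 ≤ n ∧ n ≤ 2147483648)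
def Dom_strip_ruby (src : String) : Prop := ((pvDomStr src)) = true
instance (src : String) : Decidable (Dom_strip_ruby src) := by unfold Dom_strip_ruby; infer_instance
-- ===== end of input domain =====

-- B replaces A's index loop with inner scans (str.find, a nested escape-stepping while, slicing)
-- by a single-pass four-state DFA emitting one output char per input char (objective: alternative).


-- ===== PORT A =====
-- _blank_preserving_newlines: "".join(" " if ch != "\n" else "\n" for ch in s)  (join of a per-char generator = map)
def blankPN (s : List Char) : List Char := s.map (fun ch => if ch ≠ '\n' then ' ' else '\n')

-- A's inner `while j < n` string scan, on the suffix after the opening quote; returns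
-- (chars consumed, i.e. src[i+1:j], remaining suffix src[j:]).  The one-element case folds the
-- two exits `src[j] == quote` (j += 1; break) and plain `j += 1` with the loop then ending:
-- both consume that char and leave nothing.  `src[j] == "\\" and j + 1 < n` is the two-element case.
def strScanA (q : Char) : List Char → List Char × List Char
  | [] => ([], [])
  | [b] => ([b], [])
  | b :: r :: rest' =>
    if b = '\\' then
      let p := strScanA q rest'
      (b :: r :: p.1, p.2)
    else if b = q then ([b], r :: rest')
    else
      let p := strScanA q (r :: rest')
      (b :: p.1, p.2)

theorem strScanA_rest_le (q : Char) : ∀ l : List Char, (strScanA q l).2.length ≤ l.length := by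
  intro l
  induction l using strScanA.induct q <;> simp_all [strScanA] <;> omega

-- A's main while loop over src, viewed at the current suffix src[i:]; out is the list of chunks.
-- src.find("\n", i) becomes PySem.Chars.find on the suffix (same index, shifted by i).
def loopA (out : List (List Char)) : List Char → List (List Char)
  | [] => out
  | c :: rest =>
    if c = '#' then
      let k := PySem.Chars.find (c :: rest) ['\n']
      let j := if k = -1 then (c :: rest).length else k.toNat
      loopA (out ++ [List.replicate j ' ']) ((c :: rest).drop j)
    else if c = '\'' ∨ c = '"' then
      let p := strScanA c rest
      loopA (out ++ [blankPN (c :: p.1)]) p.2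
    else
      loopA (out ++ [[c]]) rest
  termination_by l => l.length
  decreasing_by
  · simp only [List.length_drop]
    split
    · simp
    · rename_i hk
      have h0 : 0 ≤ PySem.Chars.find (c :: rest) ['\n'] := by
        have := PySem.Chars.neg_one_le_find (c :: rest) ['\n']
        omega
      have hle := PySem.Chars.find_le_length (c :: rest) ['\n']
      have hsp := (PySem.Chars.find_spec (s := c :: rest) (sub := ['\n']) h0).1
      by_cases hz : (PySem.Chars.find (c :: rest) ['\n']).toNat = 0
      · exfalso
        rw [hz] at hsp
        simp at hsp
        simp_all
      · simp at hle ⊢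
        omega
  · have := strScanA_rest_le c rest
    simp at this ⊢
    omega
  · simp

def strip_ruby (src : String) : String := String.ofList (loopA [] src.toList).flatten

-- ===== PORT B =====
-- one DFA step of Source B's for-loop body; state: 0 code, 1 comment, 2 in-string, 3 escape.
-- (Source B initialises quote to ""; it is never read before being set, so any dummy Char works.)
def stepB (acc : Int × Char × List Char) (ch : Char) : Int × Char × List Char :=
  let (state, quote, out) := acc
  if state = 0 then
    if ch = '#' then (1, quote, out ++ [' '])
    else if ch = '\'' ∨ ch = '"' then (2, ch, out ++ [' '])
    else (0, quote, out ++ [ch])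
  else if state = 1 then
    if ch = '\n' then (0, quote, out ++ ['\n']) else (1, quote, out ++ [' '])
  else if state = 2 then
    let st' : Int := if ch = '\\' then 3 else if ch = quote then 0 else 2
    (st', quote, out ++ [if ch = '\n' then '\n' else ' '])
  else (2, quote, out ++ [if ch = '\n' then '\n' else ' '])

def strip_ruby_alt (src : String) : String :=
  String.ofList (src.toList.foldl stepB ((0 : Int), ' ', [])).2.2

-- ===== PRECONDITION & SPEC =====
def Spec_strip_ruby (src : String) (out : String) : Prop := out = strip_ruby_alt src
instance (src : String) (out : String) : Decidable (Spec_strip_ruby src out) := by unfold Spec_strip_ruby; infer_instance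

-- ===== CLAIM (what is proved, stated in full; the proofs are below) =====
def Claim_equal_strip_ruby : Prop := ∀ (src : String), Dom_strip_ruby src → Spec_strip_ruby src (strip_ruby src)

-- ===== LEMMAS AND PROOFS =====

-- Abstract form of B's DFA (proof device): the output it emits from a given state.
inductive BSt where
  | code : BSt
  | com : BSt
  | str : Char → BSt
  | esc : Char → BSt

def runB : BSt → List Char → List Char
  | _, [] => []
  | .code, ch :: r =>
    if ch = '#' then ' ' :: runB .com r
    else if ch = '\'' ∨ ch = '"' then ' ' :: runB (.str ch) r
    else ch :: runB .code r
  | .com, ch :: r =>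
    if ch = '\n' then '\n' :: runB .code r else ' ' :: runB .com r
  | .str q, ch :: r =>
    (if ch = '\n' then '\n' else ' ') ::
      runB (if ch = '\\' then .esc q else if ch = q then .code else .str q) r
  | .esc q, ch :: r =>
    (if ch = '\n' then '\n' else ' ') :: runB (.str q) r

def encB (state : Int) (q : Char) : BSt :=
  if state = 0 then .code else if state = 1 then .com else if state = 2 then .str q else .esc q

theorem foldB_runB : ∀ (l : List Char) (st : Int) (q : Char) (out : List Char),
    (st = 0 ∨ st = 1 ∨ st = 2 ∨ st = 3) →
    (l.foldl stepB (st, q, out)).2.2 = out ++ runB (encB st q) l := by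
  intro l
  induction l with
  | nil => intro st q out _; simp [runB]
  | cons ch r ih =>
    intro st q out hst
    rcases hst with h | h | h | h <;> subst h <;>
      simp only [List.foldl_cons, stepB, encB] <;> norm_num <;>
      split_ifs <;>
      simp_all [ih _ _ _ (by omega : (0:Int) = 0 ∨ (0:Int) = 1 ∨ (0:Int) = 2 ∨ (0:Int) = 3)] <;>
      simp_all [encB, runB] <;> split_ifs <;> simp_all

theorem runB_com_free (mid l' : List Char) (h : '\n' ∉ mid) :
    runB .com (mid ++ l') = List.replicate mid.length ' ' ++ runB .com l' := by
  induction mid with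
  | nil => simp
  | cons b t ih =>
    simp_all [runB, List.replicate_succ]
    intro hbn
    exact absurd hbn.symm h.1

theorem find_go_singleton (a : Char) :
    ∀ (l : List Char) (k : Nat), a ∈ l →
      PySem.Chars.find.go [a] l k = ((k + (l.takeWhile (· ≠ a)).length : Nat) : Int) := by
  intro l
  induction l with
  | nil => simp
  | cons b t ih =>
    intro k hm
    by_cases hb : b = a
    · subst hb
      simp [PySem.Chars.find.go, List.isPrefixOf, List.takeWhile]
    · have ht : a ∈ t := (List.mem_cons.mp hm).resolve_left (fun h => hb h.symm)
      simp [PySem.Chars.find.go, List.isPrefixOf, List.takeWhile, hb, Ne.symm hb, ih (k + 1) ht]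
      ring

theorem find_singleton_mem (a : Char) (l : List Char) (h : a ∈ l) :
    PySem.Chars.find l [a] = (((l.takeWhile (· ≠ a)).length : Nat) : Int) := by
  simpa [PySem.Chars.find] using find_go_singleton a l 0 h

theorem scanS_runB (q : Char) : ∀ (rest : List Char),
    blankPN (strScanA q rest).1 ++ runB .code (strScanA q rest).2 = runB (.str q) rest := by
  intro rest
  induction rest using strScanA.induct q with
  | case1 => simp [strScanA, blankPN, runB]
  | case2 b => simp [strScanA, blankPN, runB]
  | case3 b r ih => simp_all [strScanA, blankPN, runB]
  | case4 b r => simp_all [strScanA, blankPN, runB]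
  | case5 b r ih => simp_all [strScanA, blankPN, runB]

theorem loopA_runB : ∀ (n : Nat) (l : List Char), l.length ≤ n → ∀ out : List (List Char),
    (loopA out l).flatten = out.flatten ++ runB .code l := by
  intro n
  induction n with
  | zero =>
    intro l hl out
    have : l = [] := List.length_eq_zero_iff.mp (Nat.le_zero.mp hl)
    subst this
    simp [loopA, runB]
  | succ n ih =>
    intro l hl out
    match l with
    | [] => simp [loopA, runB]
    | c :: rest =>
      by_cases hc : c = '#'
      · subst hc
        rw [loopA]
        simp only []
        by_cases hmem : '\n' ∈ rest
        · have hfind := find_singleton_mem '\n' ('#' :: rest) (List.mem_cons_of_mem _ hmem)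
          have htw : List.takeWhile (· ≠ '\n') ('#' :: rest) =
              '#' :: List.takeWhile (· ≠ '\n') rest := by
            simp [List.takeWhile]
          set m := (List.takeWhile (· ≠ '\n') rest).length with hm
          have hk : PySem.Chars.find ('#' :: rest) ['\n'] = ((m + 1 : Nat) : Int) := by
            rw [hfind, htw]
            simp only [List.length_cons]
            omega
          have hkne : PySem.Chars.find ('#' :: rest) ['\n'] ≠ -1 := by rw [hk]; omega
          rw [if_neg hkne, hk]
          have hdw : List.dropWhile (· ≠ '\n') rest ≠ [] := by
            intro hnil
            have := List.takeWhile_append_dropWhile (p := (· ≠ '\n')) (l := rest)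
            rw [hnil, List.append_nil] at this
            rw [← this] at hmem
            have := List.mem_takeWhile_imp hmem
            simp at this
          obtain ⟨d, t, hdt⟩ := List.exists_cons_of_ne_nil hdw
          have hh := List.head_dropWhile_not (p := (· ≠ '\n')) (l := rest) hdw
          simp only [hdt] at hh
          simp at hh
          subst hh
          have hdrop : (('#' :: rest).drop (((m + 1 : Nat) : Int)).toNat) = '\n' :: t := by
            simp only [Int.toNat_natCast, List.drop_succ_cons]
            rw [← List.takeWhile_append_dropWhile (p := (· ≠ '\n')) (l := rest), hdt]
            rw [List.drop_left' hm.symm]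
          rw [hdrop]
          simp only [if_true]
          have hlen : ('\n' :: t).length ≤ n := by
            have h1 : ('\n' :: t).length ≤ (List.dropWhile (· ≠ '\n') rest).length := by
              rw [hdt]
            have h2 := List.length_dropWhile_le (p := (· ≠ '\n')) (l := rest)
            simp at hl
            omega
          rw [ih _ hlen]
          have hrest : rest = List.takeWhile (· ≠ '\n') rest ++ '\n' :: t := by
            conv_lhs => rw [← List.takeWhile_append_dropWhile (p := (· ≠ '\n')) (l := rest), hdt]
          have hfree : '\n' ∉ List.takeWhile (· ≠ '\n') rest := by
            intro hmm
            have := List.mem_takeWhile_imp hmm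
            simp at this
          calc (out ++ [List.replicate (((m + 1 : Nat) : Int)).toNat ' ']).flatten ++
                  runB .code ('\n' :: t)
              = out.flatten ++ (List.replicate (m + 1) ' ' ++ runB .code ('\n' :: t)) := by
                simp
            _ = out.flatten ++ runB .code ('#' :: rest) := by
                congr 1
                conv_rhs => rw [runB, if_pos rfl, hrest]
                rw [runB_com_free _ _ hfree, hm.symm]
                have : runB .com ('\n' :: t) = '\n' :: runB .code t := by
                  rw [runB]; simp
                rw [this]
                have : runB .code ('\n' :: t) = '\n' :: runB .code t := by
                  rw [runB]; simp
                rw [this]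
                simp [List.replicate_succ]
        · have hnot : '\n' ∉ '#' :: rest := by simp [hmem]
          have hfind : PySem.Chars.find ('#' :: rest) ['\n'] = -1 := by
            rw [PySem.Chars.find_eq_neg_one_iff]
            rw [List.singleton_infix_iff]
            exact hnot
          rw [if_pos hfind]
          rw [List.drop_length]
          rw [loopA]
          have : runB .code ('#' :: rest) = ' ' :: runB .com rest := by
            rw [runB]; simp
          rw [this]
          have : runB .com rest = List.replicate rest.length ' ' := by
            have := runB_com_free rest [] hmem
            simpa [runB] using this
          rw [this]
          simp [List.replicate_succ]
      · by_cases hq : c = '\'' ∨ c = '"'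
        · rw [loopA]
          rw [if_neg hc, if_pos hq]
          have hlen : (strScanA c rest).2.length ≤ n := by
            have := strScanA_rest_le c rest
            simp at hl
            omega
          rw [ih _ hlen]
          have hcq : c ≠ '\n' := by rcases hq with h | h <;> subst h <;> decide
          calc (out ++ [blankPN (c :: (strScanA c rest).1)]).flatten ++
                  runB .code (strScanA c rest).2
              = out.flatten ++ (' ' :: (blankPN (strScanA c rest).1 ++
                  runB .code (strScanA c rest).2)) := by
                simp [blankPN, hcq]
            _ = out.flatten ++ runB .code (c :: rest) := by
                rw [scanS_runB]
                conv_rhs => rw [runB, if_neg hc, if_pos hq]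
        · rw [loopA]
          rw [if_neg hc, if_neg hq]
          have hlen : rest.length ≤ n := by simp at hl; omega
          rw [ih _ hlen]
          have : runB .code (c :: rest) = c :: runB .code rest := by
            rw [runB, if_neg hc, if_neg hq]
          rw [this]
          simp

-- ===== VERDICT (by name: the statement is the Claim_ definition above) =====
theorem strip_ruby_spec : Claim_equal_strip_ruby := by
  intro src _
  unfold Spec_strip_ruby strip_ruby strip_ruby_alt
  rw [foldB_runB src.toList 0 ' ' [] (by omega),
      loopA_runB src.toList.length src.toList le_rfl []]
  rfl
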